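-- pv_equiv track=rewrite | github.com/ToxicMushroom/bvp-python | ttt/ttt.py | strip_matrix
-- ===== SOURCE A (Python) =====
-- def strip_matrix(m):
--     nieuwe_matrix = []  # variabele nieuwe_matrix, deze wordt gevuld met de gestripte matrix
--     y = 0  # variabele y om de y positie in de matrix in bij te houden
--     for row in m:  # voor elke rij in de matrix
--         if y != 0 and y != (len(m) - 1):  # als y verschilt van 0 en als y verschilt van de index van de positie van de laatste rij in de matrix
--             nieuwe_matrix.append([])  # dan stoppen we een nieuwe rij in de nieuwe matrix
--             x = 0  # variabele x om de x positie in de matrix in bij te houden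
--             for el in row:  # voor elk element el in de rij van de gegeven matrix
--                 if x != 0 and x != (len(row) - 1):  # als x verschilt van 0 en als x verschilt van de index van de positie van het laatste element in de rij
--                     nieuwe_matrix[y-1].append(el)  # voeg het element el toe aan de laatste rij in de nieuwe matrix, y-1 zal altijd de laatste index zijn in de nieuwe matrix
--                 x += 1  # verhoog x met 1 zodat de index van het volgende element el in de iteratie door onze row de juiste x index heeft
--         y += 1  # verhoog y met 1 zodat de index van de volgende row in de iteratie door onze matrix m de juiste y index heeft
--     return nieuwe_matrix  # return de nieuwe matrix
-- ===== SOURCE B (Python) =====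
-- def strip_matrix(m):
--     return [row[1:-1] for row in m[1:-1]]
-- ===== Notes on version B (the rewrite author's own statement) =====
-- stated objective: simpler
-- what changed: Replaces the index-counting double loop that branches on every cell (and appends through nieuwe_matrix[y-1]) with a single slice comprehension selecting the interior rows and the interior of each row.
import Mathlib
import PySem

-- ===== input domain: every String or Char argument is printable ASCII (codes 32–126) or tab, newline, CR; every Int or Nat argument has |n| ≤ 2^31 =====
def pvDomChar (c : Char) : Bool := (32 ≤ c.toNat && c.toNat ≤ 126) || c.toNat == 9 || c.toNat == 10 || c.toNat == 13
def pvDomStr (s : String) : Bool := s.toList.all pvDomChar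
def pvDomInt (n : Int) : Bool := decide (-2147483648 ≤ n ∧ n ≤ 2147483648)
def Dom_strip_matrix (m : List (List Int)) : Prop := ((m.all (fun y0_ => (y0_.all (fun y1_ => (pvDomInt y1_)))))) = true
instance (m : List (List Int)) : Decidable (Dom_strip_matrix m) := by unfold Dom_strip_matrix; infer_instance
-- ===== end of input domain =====

-- B replaces A's index-counting double loop with interior slices m[1:-1] / row[1:-1] (simpler decomposition).

-- ===== PORT A =====
-- literal transliteration: outer fold carries (nieuwe_matrix, y), inner fold carries (nieuwe_matrix, x);
-- nieuwe_matrix[y-1].append(el) is set/getD at index (y-1).toNat, exact since y ≥ 1 in that branch.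
def strip_matrix (m : List (List Int)) : List (List Int) :=
  (m.foldl (fun (st : List (List Int) × Int) row =>
      (if st.2 ≠ 0 ∧ st.2 ≠ (m.length : Int) - 1 then
        (row.foldl (fun (st2 : List (List Int) × Int) el =>
            (if st2.2 ≠ 0 ∧ st2.2 ≠ (row.length : Int) - 1 then
              st2.1.set (st.2 - 1).toNat ((st2.1.getD (st.2 - 1).toNat []) ++ [el])
            else st2.1, st2.2 + 1))
          (st.1 ++ [[]], 0)).1
      else st.1, st.2 + 1))
    ([], 0)).1

-- ===== PORT B =====
def strip_matrix_alt (m : List (List Int)) : List (List Int) :=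
  (PySem.List.slice m (some 1) (some (-1))).map
    (fun row => PySem.List.slice row (some 1) (some (-1)))

-- ===== PRECONDITION & SPEC =====
def Spec_strip_matrix (m : List (List Int)) (out : List (List Int)) : Prop := out = strip_matrix_alt m
instance (m : List (List Int)) (out : List (List Int)) : Decidable (Spec_strip_matrix m out) := by unfold Spec_strip_matrix; infer_instance

-- ===== CLAIM (what is proved, stated in full; the proofs are below) =====
def Claim_equal_strip_matrix : Prop := ∀ (m : List (List Int)), Dom_strip_matrix m → Spec_strip_matrix m (strip_matrix m)

-- ===== LEMMAS AND PROOFS =====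

theorem pv_getD_app {α : Type} (ns : List α) (r d : α) :
    (ns ++ [r]).getD ns.length d = r := by
  induction ns with
  | nil => rfl
  | cons a t ih => simp

theorem pv_set_app {α : Type} (ns : List α) (r r' : α) :
    (ns ++ [r]).set ns.length r' = ns ++ [r'] := by
  induction ns with
  | nil => rfl
  | cons a t ih => simp [ih]

-- xs[1:-1] is tail-then-dropLast
theorem pv_slice_one_neg_one {α : Type} (xs : List α) :
    PySem.List.slice xs (some 1) (some (-1)) = xs.tail.dropLast := by
  cases xs with
  | nil => rfl
  | cons a t =>
    simp [PySem.List.slice, PySem.List.clampIdx]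
    cases t with
    | nil => rfl
    | cons b u =>
      have hneg : ¬ (((b :: u).length : Int) < 0) := by omega
      rw [if_neg hneg]
      simp [List.dropLast_eq_take]

-- inner loop: appends to the last row exactly the elements whose counter x lies in (0, L-1)
theorem pv_inner (L : Int) (l : List Int) : ∀ (x : Int) (ns : List (List Int)) (r : List Int),
    1 ≤ x → x + l.length = L →
    (l.foldl (fun (st2 : List (List Int) × Int) el =>
        (if st2.2 ≠ 0 ∧ st2.2 ≠ L - 1 then
          st2.1.set ns.length ((st2.1.getD ns.length []) ++ [el])
        else st2.1, st2.2 + 1))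
      (ns ++ [r], x)).1 = ns ++ [r ++ l.dropLast] := by
  induction l with
  | nil => intro x ns r _ _; simp
  | cons e t ih =>
    intro x ns r hx hlen
    cases t with
    | nil =>
      have : ¬ (x ≠ 0 ∧ x ≠ L - 1) := by
        simp at hlen ⊢; intro _; omega
      simp [List.foldl, this]
    | cons b u =>
      have hcond : x ≠ 0 ∧ x ≠ L - 1 := by
        constructor <;> (simp at hlen; omega)
      have step := ih (x + 1) ns (r ++ [e]) (by omega)
        (by simp only [List.length_cons] at hlen ⊢; push_cast at hlen ⊢; omega)
      rw [List.foldl_cons]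
      simp only [if_pos hcond, pv_getD_app, pv_set_app]
      rw [step]
      simp [List.dropLast_cons_of_ne_nil]

-- outer loop over the tail: each non-last row contributes its trimmed interior
theorem pv_outer (M : Int) (l : List (List Int)) :
    ∀ (y : Int) (nm : List (List Int)),
    1 ≤ y → y + l.length = M → (nm.length : Int) = y - 1 →
    (l.foldl (fun (st : List (List Int) × Int) row =>
        (if st.2 ≠ 0 ∧ st.2 ≠ M - 1 then
          (row.foldl (fun (st2 : List (List Int) × Int) el =>
              (if st2.2 ≠ 0 ∧ st2.2 ≠ (row.length : Int) - 1 then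
                st2.1.set (st.2 - 1).toNat ((st2.1.getD (st.2 - 1).toNat []) ++ [el])
              else st2.1, st2.2 + 1))
            (st.1 ++ [[]], 0)).1
        else st.1, st.2 + 1))
      (nm, y)).1 = nm ++ l.dropLast.map (fun row => row.tail.dropLast) := by
  induction l with
  | nil => intro y nm _ _ _; simp
  | cons r t ih =>
    intro y nm hy hlen hnm
    cases t with
    | nil =>
      have : ¬ (y ≠ 0 ∧ y ≠ M - 1) := by
        simp at hlen ⊢; intro _; omega
      simp [List.foldl, this]
    | cons b u =>
      have hcond : y ≠ 0 ∧ y ≠ M - 1 := by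
        constructor <;> (simp at hlen; omega)
      have hidx : (y - 1).toNat = nm.length := by omega
      have hinner : (r.foldl (fun (st2 : List (List Int) × Int) el =>
          (if st2.2 ≠ 0 ∧ st2.2 ≠ (r.length : Int) - 1 then
            st2.1.set (y - 1).toNat ((st2.1.getD (y - 1).toNat []) ++ [el])
          else st2.1, st2.2 + 1))
        (nm ++ [[]], 0)).1 = nm ++ [r.tail.dropLast] := by
        rw [hidx]
        cases r with
        | nil => simp
        | cons e s =>
          have h0 : ¬ ((0 : Int) ≠ 0 ∧ (0 : Int) ≠ (e :: s).length - 1) := by simp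
          simp only [List.foldl, h0, if_neg, not_false_eq_true]
          have := pv_inner ((e :: s).length : Int) s 1 nm [] (by omega)
            (by simp only [List.length_cons]; push_cast; omega)
          simpa using this
      have step := ih (y + 1) (nm ++ [r.tail.dropLast]) (by omega)
        (by simp only [List.length_cons] at hlen ⊢; push_cast at hlen ⊢; omega)
        (by simp only [List.length_append, List.length_cons, List.length_nil]; push_cast; omega)
      rw [List.foldl_cons]
      simp only [if_pos hcond, hinner]
      rw [step]
      simp [List.dropLast_cons_of_ne_nil]

-- ===== VERDICT (by name: the statement is the Claim_ definition above) =====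
theorem strip_matrix_spec : Claim_equal_strip_matrix := by
  intro m _
  show strip_matrix m = strip_matrix_alt m
  unfold strip_matrix strip_matrix_alt
  rw [pv_slice_one_neg_one]
  have hmap : ∀ l : List (List Int),
      l.map (fun row => PySem.List.slice row (some 1) (some (-1)))
        = l.map (fun row => row.tail.dropLast) := by
    intro l; exact List.map_congr_left (fun r _ => pv_slice_one_neg_one r)
  rw [hmap]
  cases m with
  | nil => rfl
  | cons r t =>
    have h0 : ¬ ((0 : Int) ≠ 0 ∧ (0 : Int) ≠ (r :: t).length - 1) := by simp
    simp only [List.foldl, h0, if_neg, not_false_eq_true]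
    have := pv_outer ((r :: t).length : Int) t 1 [] (by omega)
      (by simp only [List.length_cons]; push_cast; omega) (by simp)
    simpa using this
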